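-- pv_equiv track=rewrite | github.com/nougzarm/M2MIC_crypto_symetrique | TP2/TP2.py | MultiplicationAvantReduction
-- ===== SOURCE A (Python) =====
-- def MultiplicationAvantReduction(a, b):
--     polynome_produit = [0]*15   # Le polynome produit avant réduction
--     for i in range(8):
--         for j in range(8):
--             polynome_produit[i+j] += (a>>i & 1)*(b>>j & 1)
--     for i in range(len(polynome_produit)):
--         polynome_produit[i] = polynome_produit[i]%2
--     return polynome_produit
-- ===== SOURCE B (Python) =====
-- def MultiplicationAvantReduction(a, b):
--     am = a & 0xFF
--     bm = b & 0xFF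
--     prod = 0
--     for i in range(8):
--         if am >> i & 1:
--             prod ^= bm << i
--     return [prod >> k & 1 for k in range(15)]
-- ===== Notes on version B (the rewrite author's own statement) =====
-- stated objective: idiomatic
-- what changed: Replaces the 8x8 double loop that accumulates coefficient counts into a mutable 15-slot list (then reduces each mod 2) with the standard shift-and-XOR carry-less multiply on a single integer accumulator, unpacking the 15 result bits at the end.
import Mathlib
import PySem

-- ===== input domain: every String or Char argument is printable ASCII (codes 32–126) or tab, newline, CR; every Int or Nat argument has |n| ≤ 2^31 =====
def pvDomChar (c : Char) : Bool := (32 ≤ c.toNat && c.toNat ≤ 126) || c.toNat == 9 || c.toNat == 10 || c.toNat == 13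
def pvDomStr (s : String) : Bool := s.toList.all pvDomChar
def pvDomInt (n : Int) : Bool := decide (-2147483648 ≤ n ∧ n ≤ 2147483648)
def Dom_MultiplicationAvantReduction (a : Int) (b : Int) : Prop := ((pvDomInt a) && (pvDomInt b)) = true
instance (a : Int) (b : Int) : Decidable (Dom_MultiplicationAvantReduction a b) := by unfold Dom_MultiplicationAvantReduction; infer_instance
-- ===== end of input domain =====

-- B replaces A's 8x8 coefficient double loop with the standard shift-and-XOR carry-less multiply (idiomatic; same cost).

-- ===== PORT A =====
def MultiplicationAvantReduction (a : Int) (b : Int) : List Int :=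
  let p0 : List Int := List.replicate 15 0
  let p := (List.range 8).foldl (fun p i =>
      (List.range 8).foldl (fun p j =>
        p.set (i+j) (p.getD (i+j) 0 + (PySem.Int.band (a >>> i) 1) * (PySem.Int.band (b >>> j) 1))) p) p0
  p.map (fun x => PySem.Int.mod x 2)

-- ===== PORT B =====
def MultiplicationAvantReduction_alt (a : Int) (b : Int) : List Int :=
  let am := PySem.Int.band a 255
  let bm := PySem.Int.band b 255
  let prod := (List.range 8).foldl (fun (p : Int) (i : Nat) =>
      if PySem.Int.band (am >>> i) 1 ≠ 0 then PySem.Int.bxor p (bm <<< i) else p) 0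
  (List.range 15).map (fun (k : Nat) => PySem.Int.band (prod >>> k) 1)

-- ===== PRECONDITION & SPEC =====
def Spec_MultiplicationAvantReduction (a : Int) (b : Int) (out : List Int) : Prop := out = MultiplicationAvantReduction_alt a b
instance (a : Int) (b : Int) (out : List Int) : Decidable (Spec_MultiplicationAvantReduction a b out) := by unfold Spec_MultiplicationAvantReduction; infer_instance

-- ===== CLAIM (what is proved, stated in full; the proofs are below) =====
def Claim_equal_MultiplicationAvantReduction : Prop := ∀ (a : Int) (b : Int), Dom_MultiplicationAvantReduction a b → Spec_MultiplicationAvantReduction a b (MultiplicationAvantReduction a b)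

-- ===== LEMMAS AND PROOFS =====
theorem and255 (m : Nat) : m &&& 255 = m % 256 := by
  have := Nat.and_two_pow_sub_one_eq_mod m 8
  norm_num at this
  exact this

theorem band255 (a : Int) : PySem.Int.band a 255 = a % 256 := by
  unfold PySem.Int.band
  split
  · rw [if_pos (by norm_num)]
    have h1 : (255 : Int).toNat = 255 := rfl
    rw [h1, and255]
    omega
  · rw [if_pos (by norm_num)]
    have h1 : (255 : Int).toNat = 255 := rfl
    rw [h1, Nat.and_comm, and255]
    omega

def abit (a : Int) (i : Nat) : Bool := ((a % 256).toNat).testBit i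

theorem AT (a : Int) (i : Nat) (h : i < 8) :
    PySem.Int.band (a >>> i) 1 = if abit a i then 1 else 0 := by
  rw [PySem.Int.band_one, PySem.Int.mod_eq_emod_of_pos (by norm_num), Int.shiftRight_eq_div_pow]
  unfold abit
  rw [Nat.testBit_eq_decide_div_mod_eq]
  have hm : ((a % 256).toNat : Int) = a % 256 := Int.toNat_of_nonneg (by omega)
  interval_cases i <;>
    · norm_num
      split <;> rename_i hc <;> omega

theorem AT0 (a : Int) : PySem.Int.band a 1 = if abit a 0 then 1 else 0 := by
  have h := AT a 0 (by norm_num)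
  simpa using h

theorem par (l : List (Bool × Bool)) (s : Int) (acc : Bool) (h : s % 2 = if acc then 1 else 0) :
    (l.foldl (fun s p => s + (if p.1 then (1:Int) else 0) * (if p.2 then (1:Int) else 0)) s) % 2
    = if l.foldl (fun a p => Bool.xor a (p.1 && p.2)) acc then 1 else 0 := by
  induction l generalizing s acc with
  | nil => simpa
  | cons p t ih =>
      simp only [List.foldl_cons]
      apply ih
      cases hp : p.1 <;> cases hq : p.2 <;> cases acc <;> simp_all <;> omega

def tgt (a : Int) (b : Int) : List Int :=
  [
    (if (abit a 0 && abit b 0) then 1 else 0),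
    (if ((abit a 0 && abit b 1)).xor (abit a 1 && abit b 0) then 1 else 0),
    (if (((abit a 0 && abit b 2)).xor (abit a 1 && abit b 1)).xor (abit a 2 && abit b 0) then 1 else 0),
    (if ((((abit a 0 && abit b 3)).xor (abit a 1 && abit b 2)).xor (abit a 2 && abit b 1)).xor (abit a 3 && abit b 0) then 1 else 0),
    (if (((((abit a 0 && abit b 4)).xor (abit a 1 && abit b 3)).xor (abit a 2 && abit b 2)).xor (abit a 3 && abit b 1)).xor (abit a 4 && abit b 0) then 1 else 0),
    (if ((((((abit a 0 && abit b 5)).xor (abit a 1 && abit b 4)).xor (abit a 2 && abit b 3)).xor (abit a 3 && abit b 2)).xor (abit a 4 && abit b 1)).xor (abit a 5 && abit b 0) then 1 else 0),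
    (if (((((((abit a 0 && abit b 6)).xor (abit a 1 && abit b 5)).xor (abit a 2 && abit b 4)).xor (abit a 3 && abit b 3)).xor (abit a 4 && abit b 2)).xor (abit a 5 && abit b 1)).xor (abit a 6 && abit b 0) then 1 else 0),
    (if ((((((((abit a 0 && abit b 7)).xor (abit a 1 && abit b 6)).xor (abit a 2 && abit b 5)).xor (abit a 3 && abit b 4)).xor (abit a 4 && abit b 3)).xor (abit a 5 && abit b 2)).xor (abit a 6 && abit b 1)).xor (abit a 7 && abit b 0) then 1 else 0),
    (if (((((((abit a 1 && abit b 7)).xor (abit a 2 && abit b 6)).xor (abit a 3 && abit b 5)).xor (abit a 4 && abit b 4)).xor (abit a 5 && abit b 3)).xor (abit a 6 && abit b 2)).xor (abit a 7 && abit b 1) then 1 else 0),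
    (if ((((((abit a 2 && abit b 7)).xor (abit a 3 && abit b 6)).xor (abit a 4 && abit b 5)).xor (abit a 5 && abit b 4)).xor (abit a 6 && abit b 3)).xor (abit a 7 && abit b 2) then 1 else 0),
    (if (((((abit a 3 && abit b 7)).xor (abit a 4 && abit b 6)).xor (abit a 5 && abit b 5)).xor (abit a 6 && abit b 4)).xor (abit a 7 && abit b 3) then 1 else 0),
    (if ((((abit a 4 && abit b 7)).xor (abit a 5 && abit b 6)).xor (abit a 6 && abit b 5)).xor (abit a 7 && abit b 4) then 1 else 0),
    (if (((abit a 5 && abit b 7)).xor (abit a 6 && abit b 6)).xor (abit a 7 && abit b 5) then 1 else 0),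
    (if ((abit a 6 && abit b 7)).xor (abit a 7 && abit b 6) then 1 else 0),
    (if (abit a 7 && abit b 7) then 1 else 0)
  ]

theorem P1 (c1 d1 : Bool) :
    ((if c1 then (1:Int) else 0) * (if d1 then (1:Int) else 0)) % 2 = if (c1 && d1) then (1:Int) else 0 := by
  have h := par [(c1, d1)] 0 false (by norm_num)
  simpa using h

theorem P2 (c1 d1 c2 d2 : Bool) :
    ((if c1 then (1:Int) else 0) * (if d1 then (1:Int) else 0) + (if c2 then (1:Int) else 0) * (if d2 then (1:Int) else 0)) % 2 = if ((c1 && d1)).xor (c2 && d2) then (1:Int) else 0 := by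
  have h := par [(c1, d1), (c2, d2)] 0 false (by norm_num)
  simpa using h

theorem P3 (c1 d1 c2 d2 c3 d3 : Bool) :
    ((if c1 then (1:Int) else 0) * (if d1 then (1:Int) else 0) + (if c2 then (1:Int) else 0) * (if d2 then (1:Int) else 0) + (if c3 then (1:Int) else 0) * (if d3 then (1:Int) else 0)) % 2 = if (((c1 && d1)).xor (c2 && d2)).xor (c3 && d3) then (1:Int) else 0 := by
  have h := par [(c1, d1), (c2, d2), (c3, d3)] 0 false (by norm_num)
  simpa using h

theorem P4 (c1 d1 c2 d2 c3 d3 c4 d4 : Bool) :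
    ((if c1 then (1:Int) else 0) * (if d1 then (1:Int) else 0) + (if c2 then (1:Int) else 0) * (if d2 then (1:Int) else 0) + (if c3 then (1:Int) else 0) * (if d3 then (1:Int) else 0) + (if c4 then (1:Int) else 0) * (if d4 then (1:Int) else 0)) % 2 = if ((((c1 && d1)).xor (c2 && d2)).xor (c3 && d3)).xor (c4 && d4) then (1:Int) else 0 := by
  have h := par [(c1, d1), (c2, d2), (c3, d3), (c4, d4)] 0 false (by norm_num)
  simpa using h

theorem P5 (c1 d1 c2 d2 c3 d3 c4 d4 c5 d5 : Bool) :
    ((if c1 then (1:Int) else 0) * (if d1 then (1:Int) else 0) + (if c2 then (1:Int) else 0) * (if d2 then (1:Int) else 0) + (if c3 then (1:Int) else 0) * (if d3 then (1:Int) else 0) + (if c4 then (1:Int) else 0) * (if d4 then (1:Int) else 0) + (if c5 then (1:Int) else 0) * (if d5 then (1:Int) else 0)) % 2 = if (((((c1 && d1)).xor (c2 && d2)).xor (c3 && d3)).xor (c4 && d4)).xor (c5 && d5) then (1:Int) else 0 := by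
  have h := par [(c1, d1), (c2, d2), (c3, d3), (c4, d4), (c5, d5)] 0 false (by norm_num)
  simpa using h

theorem P6 (c1 d1 c2 d2 c3 d3 c4 d4 c5 d5 c6 d6 : Bool) :
    ((if c1 then (1:Int) else 0) * (if d1 then (1:Int) else 0) + (if c2 then (1:Int) else 0) * (if d2 then (1:Int) else 0) + (if c3 then (1:Int) else 0) * (if d3 then (1:Int) else 0) + (if c4 then (1:Int) else 0) * (if d4 then (1:Int) else 0) + (if c5 then (1:Int) else 0) * (if d5 then (1:Int) else 0) + (if c6 then (1:Int) else 0) * (if d6 then (1:Int) else 0)) % 2 = if ((((((c1 && d1)).xor (c2 && d2)).xor (c3 && d3)).xor (c4 && d4)).xor (c5 && d5)).xor (c6 && d6) then (1:Int) else 0 := by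
  have h := par [(c1, d1), (c2, d2), (c3, d3), (c4, d4), (c5, d5), (c6, d6)] 0 false (by norm_num)
  simpa using h

theorem P7 (c1 d1 c2 d2 c3 d3 c4 d4 c5 d5 c6 d6 c7 d7 : Bool) :
    ((if c1 then (1:Int) else 0) * (if d1 then (1:Int) else 0) + (if c2 then (1:Int) else 0) * (if d2 then (1:Int) else 0) + (if c3 then (1:Int) else 0) * (if d3 then (1:Int) else 0) + (if c4 then (1:Int) else 0) * (if d4 then (1:Int) else 0) + (if c5 then (1:Int) else 0) * (if d5 then (1:Int) else 0) + (if c6 then (1:Int) else 0) * (if d6 then (1:Int) else 0) + (if c7 then (1:Int) else 0) * (if d7 then (1:Int) else 0)) % 2 = if (((((((c1 && d1)).xor (c2 && d2)).xor (c3 && d3)).xor (c4 && d4)).xor (c5 && d5)).xor (c6 && d6)).xor (c7 && d7) then (1:Int) else 0 := by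
  have h := par [(c1, d1), (c2, d2), (c3, d3), (c4, d4), (c5, d5), (c6, d6), (c7, d7)] 0 false (by norm_num)
  simpa using h

theorem P8 (c1 d1 c2 d2 c3 d3 c4 d4 c5 d5 c6 d6 c7 d7 c8 d8 : Bool) :
    ((if c1 then (1:Int) else 0) * (if d1 then (1:Int) else 0) + (if c2 then (1:Int) else 0) * (if d2 then (1:Int) else 0) + (if c3 then (1:Int) else 0) * (if d3 then (1:Int) else 0) + (if c4 then (1:Int) else 0) * (if d4 then (1:Int) else 0) + (if c5 then (1:Int) else 0) * (if d5 then (1:Int) else 0) + (if c6 then (1:Int) else 0) * (if d6 then (1:Int) else 0) + (if c7 then (1:Int) else 0) * (if d7 then (1:Int) else 0) + (if c8 then (1:Int) else 0) * (if d8 then (1:Int) else 0)) % 2 = if ((((((((c1 && d1)).xor (c2 && d2)).xor (c3 && d3)).xor (c4 && d4)).xor (c5 && d5)).xor (c6 && d6)).xor (c7 && d7)).xor (c8 && d8) then (1:Int) else 0 := by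
  have h := par [(c1, d1), (c2, d2), (c3, d3), (c4, d4), (c5, d5), (c6, d6), (c7, d7), (c8, d8)] 0 false (by norm_num)
  simpa using h

theorem Achar (a b : Int) : MultiplicationAvantReduction a b = tgt a b := by
  simp only [MultiplicationAvantReduction, tgt, List.range_succ]
  simp
  rw [AT a 1 (by norm_num), AT a 2 (by norm_num), AT a 3 (by norm_num), AT a 4 (by norm_num), AT a 5 (by norm_num), AT a 6 (by norm_num), AT a 7 (by norm_num), AT b 1 (by norm_num), AT b 2 (by norm_num), AT b 3 (by norm_num), AT b 4 (by norm_num), AT b 5 (by norm_num), AT b 6 (by norm_num), AT b 7 (by norm_num), AT0 a, AT0 b]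
  simp only [P1, P2, P3, P4, P5, P6, P7, P8]
  simp [Bool.xor]

theorem tbit_hi (x : Int) (j : Nat) (h : 8 ≤ j) : ((x % 256).toNat).testBit j = false := by
  apply Nat.testBit_lt_two_pow
  calc (x % 256).toNat < 256 := by omega
    _ ≤ 2 ^ j := by
      calc (256:Nat) = 2 ^ 8 := by norm_num
        _ ≤ 2 ^ j := Nat.pow_le_pow_right (by norm_num) h

theorem cond_iff (m i : Nat) :
    (PySem.Int.band (((m:Nat):Int) >>> i) 1 ≠ 0) ↔ (m.testBit i = true) := by
  rw [← Int.natCast_shiftRight, show (1:Int) = ((1:Nat):Int) from rfl, PySem.Int.band_natCast,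
    Nat.and_one_is_mod, Nat.testBit_eq_decide_div_mod_eq, Nat.shiftRight_eq_div_pow]
  rcases Nat.mod_two_eq_zero_or_one (m / 2 ^ i) with h | h <;> simp [h]

theorem FB (m n : Nat) : ∀ (l : List Nat) (p : Nat),
    (l.foldl (fun q i => if m.testBit i then PySem.Int.bxor q (((n <<< i : Nat) : Int)) else q) ((p : Nat) : Int))
    = ((l.foldl (fun q i => if m.testBit i then q ^^^ (n <<< i) else q) p : Nat) : Int) := by
  intro l
  induction l with
  | nil => intro p; simp
  | cons hd tl ih =>
      intro p
      simp only [List.foldl_cons]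
      cases hc : m.testBit hd
      · rw [if_neg (by simp), if_neg (by simp)]
        exact ih p
      · rw [if_pos rfl, if_pos rfl, PySem.Int.bxor_natCast]
        exact ih (p ^^^ n <<< hd)

theorem FNat (m n : Nat) : ∀ (l : List Nat) (p k : Nat),
    ((l.foldl (fun q i => if m.testBit i then q ^^^ (n <<< i) else q) p)).testBit k
    = l.foldl (fun acc i => acc.xor (m.testBit i && (n <<< i).testBit k)) (p.testBit k) := by
  intro l
  induction l with
  | nil => intro p k; simp
  | cons hd tl ih =>
      intro p k
      simp only [List.foldl_cons]
      cases hc : m.testBit hd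
      · simp only [Bool.false_and, Bool.xor_false]
        rw [if_neg (by simp)]
        exact ih p k
      · simp only [Bool.true_and]
        rw [if_pos trivial, ih (p ^^^ n <<< hd) k, Nat.testBit_xor]

theorem ent (p k : Nat) : PySem.Int.band (((p:Nat):Int) >>> k) 1 = if p.testBit k then 1 else 0 := by
  rw [← Int.natCast_shiftRight, show (1:Int) = ((1:Nat):Int) from rfl, PySem.Int.band_natCast,
    Nat.and_one_is_mod, Nat.testBit_eq_decide_div_mod_eq, Nat.shiftRight_eq_div_pow]
  have h2 : p / 2 ^ k % 2 < 2 := Nat.mod_lt _ (by norm_num)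
  split <;> rename_i hc
  · simp only [decide_eq_true_eq] at hc
    exact_mod_cast hc
  · simp only [decide_eq_true_eq] at hc
    have h0 : p / 2 ^ k % 2 = 0 := by omega
    exact_mod_cast h0

theorem Bchar (a b : Int) : MultiplicationAvantReduction_alt a b = tgt a b := by
  have hm2 : PySem.Int.band a 255 = (((a % 256).toNat : Nat) : Int) := by
    rw [band255, Int.toNat_of_nonneg (by omega)]
  have hn2 : PySem.Int.band b 255 = (((b % 256).toNat : Nat) : Int) := by
    rw [band255, Int.toNat_of_nonneg (by omega)]
  simp only [MultiplicationAvantReduction_alt]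
  rw [hm2, hn2]
  simp only [cond_iff, ← Int.natCast_shiftLeft]
  rw [show (0:Int) = ((0:Nat):Int) from rfl, FB]
  simp only [ent, FNat]
  simp [tgt, abit, List.range_succ, Nat.testBit_shiftLeft, tbit_hi]
  constructor <;> split_ifs <;> first | rfl | omega | simp_all

-- ===== VERDICT (by name: the statement is the Claim_ definition above) =====
theorem MultiplicationAvantReduction_spec : Claim_equal_MultiplicationAvantReduction := by
  intro a b _
  unfold Spec_MultiplicationAvantReduction
  rw [Achar, Bchar]
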